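-- pv_equiv track=rewrite | github.com/SQQS123/sq_bot | SQNLP.py | backwards_longest_match
-- ===== SOURCE A (Python) =====
-- def backwards_longest_match(text, dic):
-- 	word_lst = []
-- 	i = len(text) - 1
-- 	while i >= 0:
-- 		longest_word = text[i]
-- 		for j in range(0, i):
-- 			word = text[j: i + 1]
-- 			if word in dic:
-- 				if len(word) > len(longest_word):
-- 					longest_word = word
-- 					break
-- 		word_lst.insert(0,longest_word)
-- 		i -= len(longest_word)
-- 	return word_lst
-- ===== SOURCE B (Python) =====
-- def backwards_longest_match(text, dic):
--     # Stage 1: dictionary-driven occurrence table -- for every end position,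
--     # the length of the longest dictionary word (length >= 2) ending there.
--     n = len(text)
--     best = [1] * n
--     for w in dic:
--         L = len(w)
--         if 2 <= L <= n:
--             for j in range(0, n - L + 1):
--                 if text[j:j + L] == w and L > best[j + L - 1]:
--                     best[j + L - 1] = L
--     # Stage 2: one backward walk consuming best[i] characters at a time.
--     out = []
--     i = n - 1
--     while i >= 0:
--         L = best[i]
--         out.append(text[i + 1 - L:i + 1])
--         i -= L
--     return out[::-1]
-- ===== Notes on version B (the rewrite author's own statement) =====
-- stated objective: faster
-- what changed: A repeatedly scans all split points per position with linear list-membership tests; B inverts the traversal: it first builds an occurrence table (for each dictionary word, mark at every position where it occurs the longest word length ending there) and then makes one backward walk over the text consuming table entries, with no per-position dictionary search at all.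
import Mathlib
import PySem

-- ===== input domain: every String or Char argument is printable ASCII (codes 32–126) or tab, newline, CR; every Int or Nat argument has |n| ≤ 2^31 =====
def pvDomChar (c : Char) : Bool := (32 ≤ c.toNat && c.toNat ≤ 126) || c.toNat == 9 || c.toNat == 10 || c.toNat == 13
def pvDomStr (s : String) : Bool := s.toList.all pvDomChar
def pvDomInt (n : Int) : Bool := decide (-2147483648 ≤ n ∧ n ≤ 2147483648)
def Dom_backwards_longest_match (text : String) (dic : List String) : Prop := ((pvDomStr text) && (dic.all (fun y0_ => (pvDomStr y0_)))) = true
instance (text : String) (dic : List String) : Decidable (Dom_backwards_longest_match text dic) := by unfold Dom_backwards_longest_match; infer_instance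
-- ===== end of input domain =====

-- B replaces A's per-position scan over all split points (with list membership) by a
-- dictionary-driven occurrence table built once, then a single backward walk (objective: faster).

-- ===== PORT A =====
-- inner 'for j in range(0, i)' loop of A (break = returning early)
def pvAInner (cs : List Char) (dic : List (List Char)) (i : Int) (longest : List Char) :
    List Int → List Char
  | [] => longest
  | j :: js =>
      let word := PySem.List.slice cs (some j) (some (i + 1))
      if word ∈ dic then
        if word.length > longest.length then word
        else pvAInner cs dic i longest js
      else pvAInner cs dic i longest js

-- the 'while i >= 0' loop of A; word_lst.insert(0, x) prepends to the accumulator.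
-- fuel = number of characters left of position i+1: every iteration consumes at least one
-- character, so fuel (i+1).toNat is exact; fuel 0 with 0 ≤ i is unreachable from the entry call
def pvALoop (cs : List Char) (dic : List (List Char)) :
    Nat → Int → List (List Char) → List (List Char)
  | 0, _, acc => acc
  | fuel + 1, i, acc =>
      if i < 0 then acc
      else
        match PySem.List.pyGet? cs i with
        | none => acc  -- unreachable (0 ≤ i < len cs throughout); guard for totality only
        | some c =>
            let longest := pvAInner cs dic i [c] (PySem.List.pyRange 0 i 1)
            pvALoop cs dic fuel (i - longest.length) (longest :: acc)

def backwards_longest_match (text : String) (dic : List String) : List String :=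
  (pvALoop text.toList (dic.map String.toList) (PySem.Str.len text).toNat
      (PySem.Str.len text - 1) []).map (fun w => String.ofList w)

-- ===== PORT B =====
-- inner 'for j in range(0, n - L + 1)' loop of B: mark each occurrence of w in best.
-- best[j+L-1] is always in range; pyGetD/pySetD with defaults are exact there.
def pvBMark (cs w : List Char) (L : Int) :
    List Int → List Int → List Int
  | best, [] => best
  | best, j :: js =>
      let best' :=
        if PySem.List.slice cs (some j) (some (j + L)) = w ∧
            L > PySem.List.pyGetD best (j + L - 1) 0
        then PySem.List.pySetD best (j + L - 1) L else best
      pvBMark cs w L best' js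

-- 'best = [1] * n' then the 'for w in dic' loop
def pvBTable (cs : List Char) (dic : List (List Char)) (n : Int) : List Int :=
  dic.foldl
    (fun best w =>
      let L : Int := PySem.List.len w
      if 2 ≤ L ∧ L ≤ n then
        pvBMark cs w L best (PySem.List.pyRange 0 (n - L + 1) 1)
      else best)
    (List.replicate n.toNat 1)

-- the 'while i >= 0' walk of B; out.append appends. fuel exactly as in pvALoop
-- (best[i] ≥ 1 always, so every iteration consumes at least one character)
def pvBOut (cs : List Char) (best : List Int) :
    Nat → Int → List (List Char) → List (List Char)
  | 0, _, out => out
  | fuel + 1, i, out =>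
      if i < 0 then out
      else
        let L := PySem.List.pyGetD best i 0  -- in range (0 ≤ i < len best); default unreachable
        pvBOut cs best fuel (i - L)
          (out ++ [PySem.List.slice cs (some (i + 1 - L)) (some (i + 1))])

def backwards_longest_match_alt (text : String) (dic : List String) : List String :=
  let cs := text.toList
  let n := PySem.Str.len text
  let best := pvBTable cs (dic.map String.toList) n
  ((pvBOut cs best n.toNat (n - 1) []).reverse).map (fun w => String.ofList w)

-- ===== PRECONDITION & SPEC =====
def Spec_backwards_longest_match (text : String) (dic : List String) (out : List String) : Prop := out = backwards_longest_match_alt text dic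
instance (text : String) (dic : List String) (out : List String) : Decidable (Spec_backwards_longest_match text dic out) := by unfold Spec_backwards_longest_match; infer_instance

-- ===== CLAIM (what is proved, stated in full; the proofs are below) =====
def Claim_equal_backwards_longest_match : Prop := ∀ (text : String) (dic : List String), Dom_backwards_longest_match text dic → Spec_backwards_longest_match text dic (backwards_longest_match text dic)

-- ===== LEMMAS AND PROOFS =====

-- 'there is a dictionary word of length L ending at position i'
def pvIsMatch (cs : List Char) (dic : List (List Char)) (i L : Int) : Prop :=
  2 ≤ L ∧ L ≤ i + 1 ∧ PySem.List.slice cs (some (i + 1 - L)) (some (i + 1)) ∈ dic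

-- 'b is the longest such length at i, or 1 if there is none'
def pvGood (cs : List Char) (dic : List (List Char)) (i b : Int) : Prop :=
  (b = 1 ∨ pvIsMatch cs dic i b) ∧ ∀ L, pvIsMatch cs dic i L → L ≤ b

theorem pvGood_ge_one (cs : List Char) (dic : List (List Char)) (i b : Int)
    (h : pvGood cs dic i b) : 1 ≤ b := by
  rcases h.1 with h1 | ⟨h2, _, _⟩ <;> omega

-- length of an in-range slice
theorem pvSliceLen (cs : List Char) (a b : Int) (h0 : 0 ≤ a) (hab : a ≤ b)
    (hb : b ≤ cs.length) :
    (PySem.List.slice cs (some a) (some b)).length = (b - a).toNat := by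
  rw [PySem.List.length_slice]
  have c1 : PySem.List.clampIdx cs.length b = b := by simp [PySem.List.clampIdx]; omega
  have c2 : PySem.List.clampIdx cs.length a = a := by simp [PySem.List.clampIdx]; omega
  omega

-- a length-1 slice at i is the character at i
theorem pvSliceOne (cs : List Char) (i : Int) (h0 : 0 ≤ i) (hn : i < cs.length)
    (c : Char) (hc : PySem.List.pyGet? cs i = some c) :
    PySem.List.slice cs (some i) (some (i + 1)) = [c] := by
  have hi : i.toNat < cs.length := by omega
  have hg : cs[i.toNat] = c := by
    rw [PySem.List.pyGet?_of_nonneg cs h0] at hc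
    simpa [List.getElem?_eq_getElem hi] using hc
  rw [PySem.List.slice_toNat _ h0 (by omega)]
  have h1 : (i + 1).toNat - i.toNat = 1 := by omega
  rw [h1, List.drop_eq_getElem_cons hi]
  simp [hg]

-- A's inner scan, started at any a ≤ i+1-b, returns the slice of the best length b
theorem pvAInner_eq (cs : List Char) (dic : List (List Char)) (i b : Int) (c : Char)
    (h0 : 0 ≤ i) (hn : i < cs.length) (hc : PySem.List.pyGet? cs i = some c)
    (hg : pvGood cs dic i b) :
    ∀ (N : Nat) (a : Int), (i - a).toNat ≤ N → 0 ≤ a → a ≤ i + 1 - b →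
      pvAInner cs dic i [c] (PySem.List.pyRange a i 1) =
      PySem.List.slice cs (some (i + 1 - b)) (some (i + 1)) := by
  have hb1 : 1 ≤ b := pvGood_ge_one cs dic i b hg
  intro N
  induction N with
  | zero =>
      intro a hN ha0 hab
      have hai : i ≤ a := by omega
      have hb : b = 1 := by omega
      rw [PySem.List.pyRange_one_eq_nil hai]
      simp only [pvAInner]
      rw [hb]
      have : i + 1 - 1 = i := by ring
      rw [this, pvSliceOne cs i h0 hn c hc]
  | succ N ih =>
      intro a hN ha0 hab
      by_cases hai : i ≤ a
      · have hb : b = 1 := by omega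
        rw [PySem.List.pyRange_one_eq_nil hai]
        simp only [pvAInner]
        rw [hb]
        have : i + 1 - 1 = i := by ring
        rw [this, pvSliceOne cs i h0 hn c hc]
      · rw [PySem.List.pyRange_one_cons (by omega)]
        simp only [pvAInner]
        by_cases hd : PySem.List.slice cs (some a) (some (i + 1)) ∈ dic
        · have hm : pvIsMatch cs dic i (i + 1 - a) := by
            refine ⟨by omega, by omega, ?_⟩
            have : i + 1 - (i + 1 - a) = a := by ring
            rw [this]; exact hd
          have hle : i + 1 - a ≤ b := hg.2 _ hm
          have haeq : a = i + 1 - b := by omega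
          have hlen : (PySem.List.slice cs (some a) (some (i + 1))).length = (i + 1 - a).toNat :=
            pvSliceLen cs a (i + 1) ha0 (by omega) (by omega)
          rw [if_pos hd, if_pos (by rw [hlen]; simp; omega), haeq]
        · rw [if_neg hd]
          apply ih (a + 1) (by omega) (by omega)
          by_cases hae : a = i + 1 - b
          · exfalso
            have hb2 : 2 ≤ b := by omega
            rcases hg.1 with h1 | ⟨_, _, hmem⟩
            · omega
            · rw [← hae] at hmem; exact hd hmem
          · omega

-- effect of one marking pass on one entry: entry i is touched only at j = i + 1 - L
theorem pvBMark_getD (cs w : List Char) (L : Int) (hL : 1 ≤ L) (i : Int) (hi : 0 ≤ i) :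
    ∀ (N : Nat) (a bnd : Int) (best : List Int), (bnd - a).toNat ≤ N → 0 ≤ a →
      i < (best.length : Int) →
      PySem.List.pyGetD (pvBMark cs w L best (PySem.List.pyRange a bnd 1)) i 0 =
      if a ≤ i + 1 - L ∧ i + 1 - L < bnd ∧
          PySem.List.slice cs (some (i + 1 - L)) (some (i + 1)) = w ∧
          L > PySem.List.pyGetD best i 0
      then L else PySem.List.pyGetD best i 0 := by
  intro N
  induction N with
  | zero =>
      intro a bnd best hN ha0 hlen
      rw [PySem.List.pyRange_one_eq_nil (by omega)]
      simp only [pvBMark]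
      rw [if_neg (by omega)]
  | succ N ih =>
      intro a bnd best hN ha0 hlen
      by_cases hab : bnd ≤ a
      · rw [PySem.List.pyRange_one_eq_nil hab]
        simp only [pvBMark]
        rw [if_neg (by omega)]
      · rw [PySem.List.pyRange_one_cons (by omega)]
        simp only [pvBMark]
        set best' := if PySem.List.slice cs (some a) (some (a + L)) = w ∧
            L > PySem.List.pyGetD best (a + L - 1) 0
          then PySem.List.pySetD best (a + L - 1) L else best with hbest'
        have hlen'' : best'.length = best.length := by
          rw [hbest']; split_ifs with h
          · rw [PySem.List.length_pySetD]
          · rfl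
        have hlen' : i < (best'.length : Int) := by rw [hlen'']; exact hlen
        rw [ih (a + 1) bnd best' (by omega) (by omega) hlen']
        by_cases hja : i + 1 - L = a
        · -- entry i is the one written at j = a; later j's never touch it
          have hia : i = a + L - 1 := by omega
          have hslice : (PySem.List.slice cs (some a) (some (a + L))) =
              PySem.List.slice cs (some (i + 1 - L)) (some (i + 1)) := by
            rw [← hja, show i + 1 - L + L = i + 1 from by ring]
          rw [if_neg (by rintro ⟨h1, _⟩; omega)]
          rw [hbest']
          by_cases hcond : PySem.List.slice cs (some a) (some (a + L)) = w ∧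
              L > PySem.List.pyGetD best (a + L - 1) 0
          · rw [if_pos hcond]
            have hI : PySem.List.pyGetD (PySem.List.pySetD best (a + L - 1) L) i 0 = L := by
              rw [PySem.List.pySetD_of_nonneg _ _ (by omega),
                PySem.List.pyGetD_eq_getElem _ _ hi (by simpa using hlen)]
              rw [List.getElem_set]
              rw [if_pos (by omega)]
            rw [hI, if_pos ⟨by omega, by omega, by rw [← hslice]; exact hcond.1,
                by rw [hia]; exact hcond.2⟩]
          · rw [if_neg hcond]
            rw [if_neg (by
              rintro ⟨_, _, hsl, hgt⟩
              exact hcond ⟨by rw [hslice]; exact hsl, by rw [← hia]; exact hgt⟩)]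
        · -- entry i untouched at j = a
          have hbi : PySem.List.pyGetD best' i 0 = PySem.List.pyGetD best i 0 := by
            rw [hbest']; split_ifs with h
            · rw [PySem.List.pySetD_of_nonneg _ _ (by omega),
                PySem.List.pyGetD_eq_getElem _ _ hi (by simpa using hlen),
                PySem.List.pyGetD_eq_getElem _ _ hi hlen]
              rw [List.getElem_set]
              rw [if_neg (by omega)]
            · rfl
          rw [hbi]
          by_cases hrest : a + 1 ≤ i + 1 - L ∧ i + 1 - L < bnd ∧
              PySem.List.slice cs (some (i + 1 - L)) (some (i + 1)) = w ∧
              L > PySem.List.pyGetD best i 0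
          · rw [if_pos hrest, if_pos ⟨by omega, hrest.2.1, hrest.2.2⟩]
          · rw [if_neg hrest, if_neg (by
              rintro ⟨h1, h2, h3⟩
              exact hrest ⟨by omega, h2, h3⟩)]

-- the marking pass preserves the table length
theorem pvBMark_length (cs w : List Char) (L : Int) :
    ∀ (js : List Int) (best : List Int),
      (pvBMark cs w L best js).length = best.length := by
  intro js
  induction js with
  | nil => intro best; rfl
  | cons j js ih =>
      intro best
      simp only [pvBMark]
      rw [ih]
      split_ifs with h
      · rw [PySem.List.length_pySetD]
      · rfl

theorem pvBTable_length (cs : List Char) (dic : List (List Char)) (n : Int) :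
    (pvBTable cs dic n).length = n.toNat := by
  unfold pvBTable
  have h : ∀ (ws : List (List Char)) (best : List Int),
      (ws.foldl
        (fun best w =>
          let L : Int := PySem.List.len w
          if 2 ≤ L ∧ L ≤ n then
            pvBMark cs w L best (PySem.List.pyRange 0 (n - L + 1) 1)
          else best)
        best).length = best.length := by
    intro ws
    induction ws with
    | nil => intro best; rfl
    | cons w ws ih =>
        intro best
        simp only [List.foldl_cons]
        rw [ih]
        split_ifs with h
        · rw [pvBMark_length]
        · rfl
  rw [h]
  simp

-- a match via the new word w forces the matched length to be w's length
theorem pvMatch_append (cs : List Char) (ws : List (List Char)) (w : List Char)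
    (i M : Int) (hn : i < cs.length) :
    pvIsMatch cs (ws ++ [w]) i M ↔
      pvIsMatch cs ws i M ∨
        (M = w.length ∧ 2 ≤ M ∧ M ≤ i + 1 ∧
          PySem.List.slice cs (some (i + 1 - M)) (some (i + 1)) = w) := by
  unfold pvIsMatch
  constructor
  · rintro ⟨h2, hM, hmem⟩
    rcases List.mem_append.mp hmem with hws | hw
    · exact Or.inl ⟨h2, hM, hws⟩
    · right
      have heq : PySem.List.slice cs (some (i + 1 - M)) (some (i + 1)) = w := by
        simpa using hw
      have hlen : (PySem.List.slice cs (some (i + 1 - M)) (some (i + 1))).length = M.toNat := by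
        have h := pvSliceLen cs (i + 1 - M) (i + 1) (by omega) (by omega) (by omega)
        rw [show i + 1 - (i + 1 - M) = M from by ring] at h
        exact h
      rw [heq] at hlen
      exact ⟨by omega, h2, hM, heq⟩
  · rintro (⟨h2, hM, hmem⟩ | ⟨_, h2, hM, heq⟩)
    · exact ⟨h2, hM, List.mem_append.mpr (Or.inl hmem)⟩
    · exact ⟨h2, hM, List.mem_append.mpr (Or.inr (by simp [heq]))⟩

-- processing one word w keeps every entry the best match length w.r.t. the processed words
theorem pvStep_good (cs : List Char) (ws : List (List Char)) (w : List Char) (n : Int)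
    (hn : n = (cs.length : Int)) (best : List Int) (hlen : best.length = n.toNat)
    (hinv : ∀ i : Int, 0 ≤ i → i < n → pvGood cs ws i (PySem.List.pyGetD best i 0)) :
    ∀ i : Int, 0 ≤ i → i < n →
      pvGood cs (ws ++ [w]) i
        (PySem.List.pyGetD
          (if 2 ≤ (PySem.List.len w) ∧ (PySem.List.len w) ≤ n then
            pvBMark cs w (PySem.List.len w) best
              (PySem.List.pyRange 0 (n - (PySem.List.len w) + 1) 1)
          else best) i 0) := by
  intro i hi0 hin
  have hg := hinv i hi0 hin
  have hwl : PySem.List.len w = (w.length : Int) := by simp [PySem.List.len_eq]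
  by_cases hr : 2 ≤ (PySem.List.len w) ∧ (PySem.List.len w) ≤ n
  · rw [if_pos hr]
    rw [pvBMark_getD cs w (PySem.List.len w) (by omega) i hi0
      (n - (PySem.List.len w) + 1).toNat 0 (n - (PySem.List.len w) + 1) best
      (by omega) (by omega) (by rw [hlen]; omega)]
    by_cases hc : 0 ≤ i + 1 - (PySem.List.len w) ∧
        i + 1 - (PySem.List.len w) < n - (PySem.List.len w) + 1 ∧
        PySem.List.slice cs (some (i + 1 - (PySem.List.len w))) (some (i + 1)) = w ∧
        (PySem.List.len w) > PySem.List.pyGetD best i 0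
    · rw [if_pos hc]
      constructor
      · right
        refine ⟨by omega, by omega, ?_⟩
        exact List.mem_append.mpr (Or.inr (List.mem_singleton.mpr hc.2.2.1))
      · intro M hM
        rcases (pvMatch_append cs ws w i M (by omega)).mp hM with hws | ⟨hMw, _, _, _⟩
        · have := hg.2 M hws
          omega
        · omega
    · rw [if_neg hc]
      constructor
      · rcases hg.1 with h1 | hm
        · exact Or.inl h1
        · exact Or.inr ((pvMatch_append cs ws w i _ (by omega)).mpr (Or.inl hm))
      · intro M hM
        rcases (pvMatch_append cs ws w i M (by omega)).mp hM with hws | ⟨hMw, h2, hMi, heq⟩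
        · exact hg.2 M hws
        · -- the condition failed: since the slice matches and the bounds hold,
          -- the only possible failure is len w ≤ best[i]
          have hM' : M = PySem.List.len w := by omega
          by_contra hgt
          apply hc
          refine ⟨by omega, by omega, ?_, by omega⟩
          rw [← hM']
          exact heq
  · rw [if_neg hr]
    constructor
    · rcases hg.1 with h1 | hm
      · exact Or.inl h1
      · exact Or.inr ((pvMatch_append cs ws w i _ (by omega)).mpr (Or.inl hm))
    · intro M hM
      rcases (pvMatch_append cs ws w i M (by omega)).mp hM with hws | ⟨hMw, h2, hMi, _⟩
      · exact hg.2 M hws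
      · exfalso; omega

-- the whole fold keeps the invariant
theorem pvFold_good (cs : List Char) (n : Int) (hn : n = (cs.length : Int)) :
    ∀ (ds ws : List (List Char)) (best : List Int), best.length = n.toNat →
      (∀ i : Int, 0 ≤ i → i < n → pvGood cs ws i (PySem.List.pyGetD best i 0)) →
      ∀ i : Int, 0 ≤ i → i < n →
        pvGood cs (ws ++ ds) i
          (PySem.List.pyGetD
            (ds.foldl
              (fun best w =>
                let L : Int := PySem.List.len w
                if 2 ≤ L ∧ L ≤ n then
                  pvBMark cs w L best (PySem.List.pyRange 0 (n - L + 1) 1)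
                else best)
              best) i 0) := by
  intro ds
  induction ds with
  | nil =>
      intro ws best hlen hinv i hi0 hin
      simpa using hinv i hi0 hin
  | cons w ds ih =>
      intro ws best hlen hinv i hi0 hin
      simp only [List.foldl_cons]
      have hlen1 : (if 2 ≤ (PySem.List.len w) ∧ (PySem.List.len w) ≤ n then
          pvBMark cs w (PySem.List.len w) best
            (PySem.List.pyRange 0 (n - (PySem.List.len w) + 1) 1)
        else best).length = n.toNat := by
        split_ifs with h
        · rw [pvBMark_length]; exact hlen
        · exact hlen
      have := ih (ws ++ [w]) _ hlen1 (pvStep_good cs ws w n hn best hlen hinv) i hi0 hin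
      simpa [List.append_assoc] using this

theorem pvBTable_good (cs : List Char) (dic : List (List Char)) :
    ∀ i : Int, 0 ≤ i → i < cs.length →
      pvGood cs dic i
        (PySem.List.pyGetD (pvBTable cs dic (cs.length : Int)) i 0) := by
  intro i hi0 hin
  unfold pvBTable
  have hbase : ∀ j : Int, 0 ≤ j → j < (cs.length : Int) →
      pvGood cs [] j (PySem.List.pyGetD (List.replicate ((cs.length : Int)).toNat 1) j 0) := by
    intro j hj0 hjn
    exact ⟨Or.inl (by
        rw [PySem.List.pyGetD_eq_getElem _ _ hj0 (by simp; omega)]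
        simp),
      fun L hL => absurd hL.2.2 (List.not_mem_nil)⟩
  have := pvFold_good cs (cs.length : Int) rfl dic [] _ (by simp) hbase i hi0 hin
  simpa using this

-- B's walk accumulator distributes
theorem pvBOut_acc (cs : List Char) (best : List Int) :
    ∀ (fuel : Nat) (i : Int) (out : List (List Char)),
      pvBOut cs best fuel i out = out ++ pvBOut cs best fuel i [] := by
  intro fuel
  induction fuel with
  | zero => intro i out; simp [pvBOut]
  | succ fuel ih =>
      intro i out
      by_cases h0 : i < 0
      · simp [pvBOut, h0]
      · simp only [pvBOut, h0, if_false]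
        rw [ih _ (_ ++ [_]), ih _ ([] ++ [_])]
        simp

-- main loop lemma: A's prepend-loop equals the reverse of B's append-walk
theorem pvLoop_eq (cs : List Char) (dic : List (List Char)) (best : List Int)
    (hlen : best.length = cs.length)
    (hgood : ∀ i : Int, 0 ≤ i → i < cs.length →
      pvGood cs dic i (PySem.List.pyGetD best i 0)) :
    ∀ (fuel : Nat) (i : Int), (i + 1).toNat ≤ fuel → i < cs.length →
      ∀ (acc : List (List Char)),
        pvALoop cs dic fuel i acc = (pvBOut cs best fuel i []).reverse ++ acc := by
  intro fuel
  induction fuel with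
  | zero => intro i hN hn acc; simp [pvALoop, pvBOut]
  | succ fuel ih =>
      intro i hN hn acc
      by_cases h0 : i < 0
      · simp [pvALoop, pvBOut, h0]
      · have hi : 0 ≤ i := by omega
        obtain ⟨c, hg⟩ : ∃ c, PySem.List.pyGet? cs i = some c := by
          cases hgg : PySem.List.pyGet? cs i with
          | none =>
              rw [PySem.List.pyGet?_eq_none_iff] at hgg
              exact absurd ⟨by omega, hn⟩ hgg
          | some c => exact ⟨c, rfl⟩
        simp only [pvALoop, pvBOut, h0, if_false, hg]
        set b := PySem.List.pyGetD best i 0 with hb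
        have hgd := hgood i hi hn
        rw [← hb] at hgd
        have hb1 : 1 ≤ b := pvGood_ge_one cs dic i b hgd
        have hbi : b ≤ i + 1 := by
          rcases hgd.1 with h1 | ⟨_, h2, _⟩ <;> omega
        have hA : pvAInner cs dic i [c] (PySem.List.pyRange 0 i 1) =
            PySem.List.slice cs (some (i + 1 - b)) (some (i + 1)) :=
          pvAInner_eq cs dic i b c hi hn hg hgd i.toNat 0 (by omega) (by omega) (by omega)
        rw [hA]
        have hLlen : (PySem.List.slice cs (some (i + 1 - b)) (some (i + 1))).length = b.toNat := by
          have h := pvSliceLen cs (i + 1 - b) (i + 1) (by omega) (by omega) (by omega)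
          rw [show i + 1 - (i + 1 - b) = b from by ring] at h
          exact h
        rw [hLlen]
        have hsub : i - (b.toNat : Int) = i - b := by omega
        rw [hsub]
        rw [ih (i - b) (by omega) (by omega)]
        rw [pvBOut_acc cs best fuel (i - b) ([] ++ [_])]
        simp

-- ===== VERDICT (by name: the statement is the Claim_ definition above) =====
theorem backwards_longest_match_spec : Claim_equal_backwards_longest_match := by
  intro text dic _hdom
  unfold Spec_backwards_longest_match backwards_longest_match backwards_longest_match_alt
  simp only [PySem.Str.len_eq]
  set cs := text.toList with hcs
  set dl := dic.map String.toList with hdl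
  rw [pvLoop_eq cs dl (pvBTable cs dl (cs.length : Int))
    (by rw [pvBTable_length]; simp)
    (pvBTable_good cs dl)
    ((cs.length : Int)).toNat ((cs.length : Int) - 1)
    (by omega) (by omega) []]
  simp
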